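-- pv_equiv track=rewrite | github.com/AnxForever/stylekit-style-prompts-skill | scripts/qa_prompt.py | contains_any_positive
-- ===== SOURCE A (Python) =====
-- NEGATORS = [
--     "don't",
--     "do not",
--     "must not",
--     "never",
--     "without",
--     "avoid",
--     "forbid",
--     "forbidden",
--     "不要",
--     "避免",
--     "禁止",
-- ]
--
-- def contains_any_positive(text: str, words: list[str], window: int = 40) -> list[str]:
--     """Return hits that are not in obvious negated context."""
--     hits = []
--     lower = text.lower()
--     for word in words:
--         start = 0
--         found_positive = False
--         while True:
--             idx = lower.find(word, start)
--             if idx < 0: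
--                 break
--             prefix = lower[max(0, idx - window):idx]
--             if not any(neg in prefix for neg in NEGATORS):
--                 found_positive = True
--                 break
--             start = idx + len(word)
--         if found_positive:
--             hits.append(word)
--     return hits
-- ===== SOURCE B (Python) =====
-- NEGATORS = [
--     "don't",
--     "do not",
--     "must not",
--     "never",
--     "without",
--     "avoid",
--     "forbid",
--     "forbidden",
--     "不要",
--     "避免",
--     "禁止",
-- ]
--
-- def contains_any_positive(text: str, words: list[str], window: int = 40) -> list[str]:
--     """Return hits that are not in obvious negated context.
--
--     Precomputes an index of every negator occurrence (start, length) in the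
--     lowercased text once, then judges each word occurrence by asking whether
--     some indexed negator occurrence lies fully inside its lookback window.
--     """
--     lower = text.lower()
--     n = len(lower)
--     neg_matches = []
--     for neg in NEGATORS:
--         L = len(neg)
--         for p in range(n - L + 1):
--             if lower[p:p+L] == neg:
--                 neg_matches.append((p, L))
--     hits = []
--     for word in words:
--         start = 0
--         while True:
--             idx = lower.find(word, start)
--             if idx < 0:
--                 break
--             lo = max(0, idx - window)
--             if not any(lo <= s and s + L <= idx for (s, L) in neg_matches):
--                 hits.append(word)
--                 break
--             start = idx + len(word)
--     return hits
-- ===== Notes on version B (the rewrite author's own statement) =====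
-- stated objective: alternative
-- what changed: B precomputes one index of every negator occurrence (start, length) in the lowercased text and judges each word occurrence by asking whether an indexed negator occurrence lies fully inside its lookback window, instead of A's re-scanning the window prefix for all 11 negators at every occurrence.
import Mathlib
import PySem

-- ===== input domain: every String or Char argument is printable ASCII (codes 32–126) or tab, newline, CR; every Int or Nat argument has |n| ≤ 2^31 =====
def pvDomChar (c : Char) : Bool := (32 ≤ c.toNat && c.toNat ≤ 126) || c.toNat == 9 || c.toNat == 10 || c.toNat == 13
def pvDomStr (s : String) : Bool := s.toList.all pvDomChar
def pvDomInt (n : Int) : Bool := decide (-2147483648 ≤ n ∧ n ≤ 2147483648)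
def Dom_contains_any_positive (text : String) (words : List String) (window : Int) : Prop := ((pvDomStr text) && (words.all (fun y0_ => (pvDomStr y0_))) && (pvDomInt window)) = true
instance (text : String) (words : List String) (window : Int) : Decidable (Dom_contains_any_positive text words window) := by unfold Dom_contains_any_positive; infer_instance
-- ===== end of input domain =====

-- B precomputes an index of all negator occurrences once and judges each word
-- occurrence by window containment, instead of re-scanning the window prefix
-- for every negator at every occurrence (objective: alternative algorithm).

def pvNegators : List String :=
  ["don't", "do not", "must not", "never", "without", "avoid", "forbid",
   "forbidden", "不要", "避免", "禁止"]

-- ===== PORT A =====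
-- the `while True: idx = lower.find(word, start) …` loop of A, returning found_positive;
-- fuel = lower.length + 1 at the call site, enough since each iteration either breaks
-- or advances start by len(word) ≥ 1 past an occurrence (an empty word breaks at once).
def pvAFind (lower word : List Char) (window : Int) : Nat → Nat → Bool
  | _, 0 => false
  | start, fuel + 1 =>
    let idx := PySem.Chars.findFrom lower word (start : Int)
    if idx < 0 then false
    else if pvNegators.any (fun neg =>
        PySem.Chars.isIn neg.toList
          (PySem.List.slice lower (some (max 0 (idx - window))) (some idx))) then
      pvAFind lower word window (idx.toNat + word.length) fuel
    else true

def contains_any_positive (text : String) (words : List String) (window : Int) : List String :=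
  let lower := PySem.Chars.lower text.toList
  words.foldl (fun hits word =>
    if pvAFind lower word.toList window 0 (lower.length + 1) then hits ++ [word]
    else hits) []

-- ===== PORT B =====
-- B's negator index: every (start, length) at which some negator occurs in lower.
def pvNegMatches (lower : List Char) : List (Int × Int) :=
  pvNegators.foldl (fun acc neg =>
    (PySem.List.pyRange 0 ((lower.length : Int) - (neg.toList.length : Int) + 1) 1).foldl
      (fun acc p =>
        if PySem.List.slice lower (some p) (some (p + (neg.toList.length : Int))) = neg.toList
        then acc ++ [(p, (neg.toList.length : Int))] else acc)
      acc) []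

-- B's occurrence loop: an occurrence at idx is positive when no indexed negator
-- occurrence lies fully inside [max(0, idx-window), idx).
def pvBFind (lower word : List Char) (window : Int) (ms : List (Int × Int)) :
    Nat → Nat → Bool
  | _, 0 => false
  | start, fuel + 1 =>
    let idx := PySem.Chars.findFrom lower word (start : Int)
    if idx < 0 then false
    else if ms.any (fun m =>
        decide (max 0 (idx - window) ≤ m.1) && decide (m.1 + m.2 ≤ idx)) then
      pvBFind lower word window ms (idx.toNat + word.length) fuel
    else true

def contains_any_positive_alt (text : String) (words : List String) (window : Int) : List String :=
  let lower := PySem.Chars.lower text.toList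
  let ms := pvNegMatches lower
  words.foldl (fun hits word =>
    if pvBFind lower word.toList window ms 0 (lower.length + 1) then hits ++ [word]
    else hits) []

-- ===== PRECONDITION & SPEC =====
def Spec_contains_any_positive (text : String) (words : List String) (window : Int) (out : List String) : Prop := out = contains_any_positive_alt text words window
instance (text : String) (words : List String) (window : Int) (out : List String) : Decidable (Spec_contains_any_positive text words window out) := by unfold Spec_contains_any_positive; infer_instance

-- ===== CLAIM (what is proved, stated in full; the proofs are below) =====
def Claim_equal_contains_any_positive : Prop := ∀ (text : String) (words : List String) (window : Int), Dom_contains_any_positive text words window → Spec_contains_any_positive text words window (contains_any_positive text words window)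

-- ===== LEMMAS AND PROOFS =====

lemma pvNegators_ne_nil : ∀ neg ∈ pvNegators, neg.toList ≠ [] := by decide

-- CPython's find quirk: a start past len(s) gives -1 even for sub = ''.
lemma pv_findFrom_past (s sub : List Char) (k : Nat) (h : s.length < k) :
    PySem.Chars.findFrom s sub (k : Int) = -1 := by
  simp only [PySem.Chars.findFrom]
  split_ifs with h1 h2 <;> first
    | rfl
    | (exfalso; omega)

lemma pv_findFrom_le (s sub : List Char) (k : Nat)
    (hne : ¬ PySem.Chars.findFrom s sub (k : Int) < 0) :
    PySem.Chars.findFrom s sub (k : Int) ≤ (s.length : Int) := by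
  by_cases hk : k ≤ s.length
  · rw [PySem.Chars.findFrom_natCast s sub k hk] at *
    have hle := PySem.Chars.find_le_length (s.drop k) sub
    rw [List.length_drop] at hle
    split at hne
    · omega
    · split
      · omega
      · omega
  · rw [pv_findFrom_past s sub k (by omega)] at hne; omega

-- membership in the inner per-negator scan of pvNegMatches
lemma pv_mem_inner (lower neg : List Char) (L : Int) (r : List Int)
    (acc : List (Int × Int)) (m : Int × Int) :
    m ∈ r.foldl (fun acc p =>
        if PySem.List.slice lower (some p) (some (p + L)) = neg
        then acc ++ [(p, L)] else acc) acc ↔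
    m ∈ acc ∨ ∃ p ∈ r, PySem.List.slice lower (some p) (some (p + L)) = neg ∧ m = (p, L) := by
  induction r generalizing acc with
  | nil => simp
  | cons x xs ih =>
    simp only [List.foldl_cons]
    rw [ih]
    split_ifs with h <;> simp [List.mem_append, h] <;> tauto

-- membership in B's negator index
lemma pv_mem_negMatches (lower : List Char) (m : Int × Int) :
    m ∈ pvNegMatches lower ↔
    ∃ neg ∈ pvNegators, ∃ p : Int,
      (0 ≤ p ∧ p < (lower.length : Int) - neg.toList.length + 1) ∧
      PySem.List.slice lower (some p) (some (p + (neg.toList.length : Int))) = neg.toList ∧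
      m = (p, (neg.toList.length : Int)) := by
  unfold pvNegMatches
  suffices h : ∀ (negs : List String) (acc : List (Int × Int)),
      m ∈ negs.foldl (fun acc neg =>
        (PySem.List.pyRange 0 ((lower.length : Int) - (neg.toList.length : Int) + 1) 1).foldl
          (fun acc p =>
            if PySem.List.slice lower (some p) (some (p + (neg.toList.length : Int))) = neg.toList
            then acc ++ [(p, (neg.toList.length : Int))] else acc)
          acc) acc ↔
      m ∈ acc ∨ ∃ neg ∈ negs, ∃ p : Int,
        (0 ≤ p ∧ p < (lower.length : Int) - neg.toList.length + 1) ∧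
        PySem.List.slice lower (some p) (some (p + (neg.toList.length : Int))) = neg.toList ∧
        m = (p, (neg.toList.length : Int)) by
    rw [h pvNegators []]; simp
  intro negs
  induction negs with
  | nil => simp
  | cons x xs ih =>
    intro acc
    simp only [List.foldl_cons]
    rw [ih, pv_mem_inner]
    constructor
    · rintro (⟨hm | ⟨p, hp, hs, rfl⟩⟩ | ⟨neg, hneg, p, h1, h2, h3⟩)
      · exact Or.inl hm
      · exact Or.inr ⟨x, List.mem_cons_self, p, PySem.List.mem_pyRange_one.mp hp, hs, rfl⟩
      · exact Or.inr ⟨neg, List.mem_cons_of_mem _ hneg, p, h1, h2, h3⟩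
    · rintro (hm | ⟨neg, hneg, p, h1, h2, h3⟩)
      · exact Or.inl (Or.inl hm)
      · rcases List.mem_cons.mp hneg with rfl | hneg
        · exact Or.inl (Or.inr ⟨p, PySem.List.mem_pyRange_one.mpr h1, h2, h3⟩)
        · exact Or.inr ⟨neg, hneg, p, h1, h2, h3⟩

-- a negator is an infix of the window prefix iff it occurs (as drop/take) fully
-- inside the window — all in Nat
lemma pv_infix_iff (lower neg : List Char) (a k : Nat) (hne : neg ≠ []) :
    (∃ j, neg <+: List.drop j (List.take (k - a) (List.drop a lower))) ↔
    (∃ q : Nat, a ≤ q ∧ q + neg.length ≤ k ∧ List.take neg.length (List.drop q lower) = neg) := by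
  have hL : 0 < neg.length := List.length_pos_of_ne_nil hne
  constructor
  · rintro ⟨j, hj⟩
    rw [List.drop_take, List.drop_drop] at hj
    have heq := List.prefix_iff_eq_take.mp hj
    rw [List.take_take] at heq
    have hlen : neg.length = min (min neg.length (k - a - j)) (lower.length - (a + j)) := by
      simpa using congrArg List.length heq
    have h1 : neg.length ≤ k - a - j := by omega
    have h2 : neg.length ≤ lower.length - (j + a) := by omega
    refine ⟨j + a, by omega, by omega, ?_⟩
    rw [min_eq_left h1] at heq
    rw [Nat.add_comm j a]
    exact heq.symm
  · rintro ⟨q, hq1, hq2, hq3⟩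
    have hqlen : q + neg.length ≤ lower.length := by
      have hlen := congrArg List.length hq3
      simp only [List.length_take, List.length_drop] at hlen
      omega
    refine ⟨q - a, ?_⟩
    rw [List.drop_take, List.drop_drop]
    rw [show a + (q - a) = q by omega]
    rw [List.prefix_iff_eq_take, List.take_take]
    rw [show min neg.length (k - a - (q - a)) = neg.length by omega]
    exact hq3.symm

-- the two per-occurrence checks agree for any occurrence index 0 ≤ idx ≤ len(lower)
lemma pv_cond_eq (lower : List Char) (window idx : Int) (h0 : 0 ≤ idx)
    (hn : idx ≤ (lower.length : Int)) :
    (pvNegators.any fun neg =>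
      PySem.Chars.isIn neg.toList
        (PySem.List.slice lower (some (max 0 (idx - window))) (some idx))) =
    ((pvNegMatches lower).any fun m =>
      decide (max 0 (idx - window) ≤ m.1) && decide (m.1 + m.2 ≤ idx)) := by
  set lo := max 0 (idx - window) with hlo_def
  have hlo : 0 ≤ lo := le_max_left _ _
  have hsl : PySem.List.slice lower (some lo) (some idx) =
      List.take (idx.toNat - lo.toNat) (List.drop lo.toNat lower) :=
    PySem.List.slice_toNat lower hlo h0
  rw [Bool.eq_iff_iff]
  simp only [List.any_eq_true, Bool.and_eq_true, decide_eq_true_eq]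
  constructor
  · rintro ⟨neg, hneg, hin⟩
    have hne := pvNegators_ne_nil neg hneg
    rw [← PySem.Chars.exists_prefix_drop_iff_isIn, hsl] at hin
    obtain ⟨q, hq1, hq2, hq3⟩ := (pv_infix_iff lower neg.toList lo.toNat idx.toNat hne).mp hin
    refine ⟨((q : Int), (neg.toList.length : Int)), ?_, by omega, by omega⟩
    rw [pv_mem_negMatches]
    refine ⟨neg, hneg, (q : Nat), ⟨by omega, by omega⟩, ?_, rfl⟩
    rw [PySem.List.slice_toNat lower (by omega) (by omega)]
    rw [show ((q : Int) + (neg.toList.length : Int)).toNat - ((q : Int)).toNat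
        = neg.toList.length by omega]
    rw [show ((q : Int)).toNat = q by omega]
    exact hq3
  · rintro ⟨m, hm, h1, h2⟩
    obtain ⟨neg, hneg, p, ⟨hp0, hpn⟩, hslice, rfl⟩ := (pv_mem_negMatches lower m).mp hm
    have hne := pvNegators_ne_nil neg hneg
    refine ⟨neg, hneg, ?_⟩
    rw [← PySem.Chars.exists_prefix_drop_iff_isIn, hsl]
    refine (pv_infix_iff lower neg.toList lo.toNat idx.toNat hne).mpr ⟨p.toNat, by omega, by omega, ?_⟩
    rw [PySem.List.slice_toNat lower hp0 (by omega)] at hslice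
    rw [show (p + (neg.toList.length : Int)).toNat - p.toNat = neg.toList.length by omega] at hslice
    exact hslice

-- A's occurrence loop equals B's, for every start and fuel
lemma pv_find_eq (lower word : List Char) (window : Int) (start fuel : Nat) :
    pvAFind lower word window start fuel =
    pvBFind lower word window (pvNegMatches lower) start fuel := by
  induction fuel generalizing start with
  | zero => rfl
  | succ fuel ih =>
    simp only [pvAFind, pvBFind]
    by_cases hneg : PySem.Chars.findFrom lower word (start : Int) < 0
    · simp [hneg]
    · have hle : PySem.Chars.findFrom lower word (start : Int) ≤ (lower.length : Int) :=
        pv_findFrom_le lower word start hneg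
      simp only [if_neg hneg]
      rw [pv_cond_eq lower window _ (by omega) hle]
      split
      · exact ih _
      · rfl

-- ===== VERDICT (by name: the statement is the Claim_ definition above) =====
theorem contains_any_positive_spec : Claim_equal_contains_any_positive := by
  intro text words window _
  unfold Spec_contains_any_positive contains_any_positive contains_any_positive_alt
  simp only [pv_find_eq]
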